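-- pv_equiv track=rewrite | github.com/Aditya-A-Chavan/Info-Sec-Lab | expt2/client.py | get_key_order
-- ===== SOURCE A (Python) =====
-- def get_key_order(key):
--     if key.isdigit():
--         num = int(key)
--         return list(range(num))
--     else:
--         order = []
--         for i, char in enumerate(key):
--             order.append((char, i))
--         order.sort()
--         return [i for _, i in order]
-- ===== SOURCE B (Python) =====
-- def get_key_order(key):
--     if key.isdigit():
--         num = int(key)
--         return list(range(num))
--     buckets = {}
--     for i, ch in enumerate(key):
--         buckets.setdefault(ch, []).append(i)
--     result = []
--     for ch in sorted(buckets):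
--         result.extend(buckets[ch])
--     return result
-- ===== Notes on version B (the rewrite author's own statement) =====
-- stated objective: faster
-- what changed: Replaces sorting all n (char, index) tuples with a single grouping pass into per-character dict buckets followed by a sort of only the distinct characters, concatenating the ascending-index buckets.
import Mathlib
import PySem

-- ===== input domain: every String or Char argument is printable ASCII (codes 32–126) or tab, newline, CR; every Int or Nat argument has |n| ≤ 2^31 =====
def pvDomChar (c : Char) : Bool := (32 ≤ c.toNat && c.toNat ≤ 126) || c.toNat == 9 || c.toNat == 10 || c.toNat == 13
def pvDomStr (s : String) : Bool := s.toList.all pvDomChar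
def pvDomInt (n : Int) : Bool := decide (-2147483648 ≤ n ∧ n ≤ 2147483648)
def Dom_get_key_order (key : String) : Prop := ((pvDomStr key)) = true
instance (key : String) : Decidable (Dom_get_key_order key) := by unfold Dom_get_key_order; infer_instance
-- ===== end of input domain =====

-- B replaces A's sort of all (char, index) tuples by a one-pass group-by-character
-- bucket dictionary followed by a sort of the (few) distinct characters.

-- ===== PORT A =====
def get_key_order (key : String) : List Int :=
  if PySem.Str.strIsdigit key then
    match PySem.Int.ofStr? key with          -- int(key); never fails when key.isdigit()
    | some num => PySem.List.pyRange 0 num 1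
    | none => []                             -- unreachable: isdigit keys parse
  else
    let order := (PySem.List.enumerate key.toList).foldl
      (fun acc p => acc ++ [(p.2, p.1)]) ([] : List (Char × Int))
    let sortedOrder := PySem.List.sorted2 order (fun p => p.1) (fun p => p.2)
    sortedOrder.map (fun p => p.2)

-- ===== PORT B =====
def get_key_order_alt (key : String) : List Int :=
  if PySem.Str.strIsdigit key then
    match PySem.Int.ofStr? key with
    | some num => PySem.List.pyRange 0 num 1
    | none => []
  else
    let buckets := (PySem.List.enumerate key.toList).foldl
      (fun d p => d.modify p.2 [] (fun l => l ++ [p.1]))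
      (PySem.Dict.empty : PySem.Dict Char (List Int))
    let ks := PySem.List.sorted buckets.keys (fun c => c)
    ks.foldl (fun acc c => acc ++ buckets.getD c []) []

-- ===== PRECONDITION & SPEC =====
def Spec_get_key_order (key : String) (out : List Int) : Prop := out = get_key_order_alt key
instance (key : String) (out : List Int) : Decidable (Spec_get_key_order key out) := by unfold Spec_get_key_order; infer_instance

-- ===== CLAIM (what is proved, stated in full; the proofs are below) =====
def Claim_equal_get_key_order : Prop := ∀ (key : String), Dom_get_key_order key → Spec_get_key_order key (get_key_order key)

-- ===== LEMMAS AND PROOFS =====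

-- Python's lexicographic < on (char, index) tuples, as a Prop and as the Bool sorted2 uses.
def pvLex (a b : Char × Int) : Prop := a.1 < b.1 ∨ (a.1 = b.1 ∧ a.2 < b.2)

def pvBlex (a b : Char × Int) : Bool :=
  decide (a.1 < b.1) || (!decide (b.1 < a.1) && decide (a.2 < b.2))

lemma pvBlex_iff (a b : Char × Int) : pvBlex a b = true ↔ pvLex a b := by
  unfold pvBlex pvLex
  by_cases h1 : a.1 < b.1
  · simp [h1]
  · by_cases h2 : b.1 < a.1
    · have hne : ¬ a.1 = b.1 := ne_of_gt h2
      simp [h1, h2, hne]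
    · have he : a.1 = b.1 := le_antisymm (not_lt.1 h2) (not_lt.1 h1)
      simp [he]

lemma pvLex_trans {a b c : Char × Int} (h1 : pvLex a b) (h2 : pvLex b c) : pvLex a c := by
  unfold pvLex at *
  rcases h1 with h1 | ⟨h1, h1'⟩ <;> rcases h2 with h2 | ⟨h2, h2'⟩
  · exact Or.inl (lt_trans h1 h2)
  · exact Or.inl (h2 ▸ h1)
  · exact Or.inl (h1 ▸ h2)
  · exact Or.inr ⟨h1.trans h2, lt_trans h1' h2'⟩

lemma pvLex_total_of_ne {a b : Char × Int} (h : ¬ pvLex a b) (h' : ¬ pvLex b a) : a = b := by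
  unfold pvLex at *
  push Not at h h'
  rcases lt_trichotomy a.1 b.1 with hc | hc | hc
  · exact absurd hc (by intro hx; exact absurd hx (by simpa using h.1))
  · have := h.2 hc
    have := h'.2 hc.symm
    exact Prod.ext hc (by omega)
  · exact absurd hc (by intro hx; exact absurd hx (by simpa using h'.1))

lemma pvLex_irrefl (a : Char × Int) : ¬ pvLex a a := by
  unfold pvLex; simp

-- inserting a fresh element keeps the accumulator pvLex-sorted
lemma pvInsert_pairwise (x : Char × Int) :
    ∀ (ys : List (Char × Int)), ys.Pairwise pvLex → x ∉ ys →
      (PySem.List.insertBy pvBlex x ys).Pairwise pvLex := by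
  intro ys
  induction ys with
  | nil => intro _ _; simp [PySem.List.insertBy]
  | cons y ys ih =>
    intro hpw hx
    rw [List.pairwise_cons] at hpw
    simp only [List.mem_cons, not_or] at hx
    by_cases hb : pvBlex x y = true
    · have hxy : pvLex x y := (pvBlex_iff x y).1 hb
      simp only [PySem.List.insertBy, hb, if_true]
      exact List.Pairwise.cons
        (by intro z hz; rcases List.mem_cons.1 hz with rfl | hz
            · exact hxy
            · exact pvLex_trans hxy (hpw.1 z hz))
        (List.Pairwise.cons hpw.1 hpw.2)
    · have hyx : pvLex y x := by
        by_contra hyx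
        exact hx.1 (pvLex_total_of_ne (fun h => hb ((pvBlex_iff x y).2 h)) hyx)
      simp only [PySem.List.insertBy, hb]
      exact List.Pairwise.cons
        (by intro z hz
            rcases (PySem.List.mem_insertBy pvBlex x z ys).1 hz with rfl | hz
            · exact hyx
            · exact hpw.1 z hz)
        (ih hpw.2 hx.2)

lemma pvFold_pairwise :
    ∀ (xs acc : List (Char × Int)), xs.Nodup → acc.Pairwise pvLex →
      (∀ a ∈ xs, a ∉ acc) →
      (xs.foldl (fun a x => PySem.List.insertBy pvBlex x a) acc).Pairwise pvLex := by
  intro xs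
  induction xs with
  | nil => intro acc _ h _; simpa using h
  | cons x xs ih =>
    intro acc hnd hacc hdisj
    rw [List.nodup_cons] at hnd
    simp only [List.foldl_cons]
    refine ih _ hnd.2 (pvInsert_pairwise x acc hacc (hdisj x (by simp))) ?_
    intro a ha hmem
    rcases (PySem.List.mem_insertBy pvBlex x a acc).1 hmem with rfl | hmem
    · exact hnd.1 ha
    · exact hdisj a (by simp [ha]) hmem

-- sorted2 with the tuple key (fst, snd) IS the insertBy fold with pvBlex
lemma pvSorted2_eq_fold (xs : List (Char × Int)) :
    PySem.List.sorted2 xs (fun p => p.1) (fun p => p.2) =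
      xs.foldl (fun a x => PySem.List.insertBy pvBlex x a) [] := rfl

-- characterisation: sorted2 of a Nodup list is its unique pvLex-sorted permutation
lemma pvSorted2_eq_of_perm_of_pairwise (xs ys : List (Char × Int))
    (hnd : xs.Nodup) (hp : ys.Perm xs) (hpw : ys.Pairwise pvLex) :
    PySem.List.sorted2 xs (fun p => p.1) (fun p => p.2) = ys := by
  have hperm : (PySem.List.sorted2 xs (fun p => p.1) (fun p => p.2)).Perm xs :=
    PySem.List.sorted2_perm xs _ _ _
  have hpw2 : (PySem.List.sorted2 xs (fun p => p.1) (fun p => p.2)).Pairwise pvLex := by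
    rw [pvSorted2_eq_fold]
    exact pvFold_pairwise xs [] hnd (by simp) (by simp)
  refine List.Perm.eq_of_pairwise ?_ hpw2 hpw (hperm.trans hp.symm)
  intro a b _ _ h1 h2
  exact absurd (pvLex_trans h1 h2) (pvLex_irrefl a)

-- grouping a list by a Nodup list of keys covering it is a permutation of it
lemma pvGroup_perm :
    ∀ (ks : List Char) (l : List (Char × Int)), ks.Nodup → (∀ p ∈ l, p.1 ∈ ks) →
      (ks.flatMap (fun c => l.filter (fun p => p.1 == c))).Perm l := by
  intro ks
  induction ks with
  | nil =>
    intro l _ hcov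
    have : l = [] := List.eq_nil_iff_forall_not_mem.2 (fun p hp => by simpa using hcov p hp)
    simp [this]
  | cons c ks ih =>
    intro l hnd hcov
    rw [List.nodup_cons] at hnd
    have hrest : ∀ c' ∈ ks, l.filter (fun p => p.1 == c') =
        (l.filter (fun p => !(p.1 == c))).filter (fun p => p.1 == c') := by
      intro c' hc'
      rw [List.filter_filter]
      refine (List.filter_congr ?_).symm
      intro p _
      have hcc : ¬ c' = c := fun hc => hnd.1 (hc ▸ hc')
      by_cases h : p.1 = c'
      · simp [h, hcc]
      · simp [h]
    have hstep : (ks.flatMap (fun c' => l.filter (fun p => p.1 == c'))) =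
        (ks.flatMap (fun c' => (l.filter (fun p => !(p.1 == c))).filter (fun p => p.1 == c'))) := by
      apply List.flatMap_congr  -- may not exist; fallback below
      intro c' hc'
      exact hrest c' hc'
    rw [List.flatMap_cons, hstep]
    have hperm := ih (l.filter (fun p => !(p.1 == c))) hnd.2 ?_
    · exact (hperm.append_left (l.filter (fun p => p.1 == c))).trans
        (List.filter_append_perm (fun p => p.1 == c) l)
    · intro p hp
      rw [List.mem_filter] at hp
      have := hcov p hp.1
      simp only [List.mem_cons] at this
      rcases this with h | h
      · have hnc : ¬ p.1 = c := by simpa using hp.2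
        exact absurd h hnc
      · exact h

-- the grouped list is pvLex-sorted when keys are increasing and the list is index-increasing
lemma pvGroup_pairwise (l : List (Char × Int)) (hl : l.Pairwise (fun p q => p.2 < q.2)) :
    ∀ (ks : List Char), ks.Pairwise (· < ·) →
      (ks.flatMap (fun c => l.filter (fun p => p.1 == c))).Pairwise pvLex := by
  intro ks
  induction ks with
  | nil => intro _; exact List.Pairwise.nil
  | cons c ks ih =>
    intro hpw
    rw [List.pairwise_cons] at hpw
    rw [List.flatMap_cons, List.pairwise_append]
    refine ⟨?_, ih hpw.2, ?_⟩
    · refine (List.Pairwise.filter _ hl).imp_of_mem ?_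
      intro a b ha hb hab
      have ha1 : a.1 = c := by simpa using (List.mem_filter.1 ha).2
      have hb1 : b.1 = c := by simpa using (List.mem_filter.1 hb).2
      exact Or.inr ⟨ha1.trans hb1.symm, hab⟩
    · intro a ha b hb
      have ha1 : a.1 = c := by simpa using (List.mem_filter.1 ha).2
      rcases List.mem_flatMap.1 hb with ⟨c', hc', hb'⟩
      have hb1 : b.1 = c' := by simpa using (List.mem_filter.1 hb').2
      exact Or.inl (by rw [ha1, hb1]; exact hpw.1 c' hc')

-- the (char, index) pair list both branches are about
def pvPairs (key : String) : List (Char × Int) :=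
  (PySem.List.enumerate key.toList).map (fun p => (p.2, p.1))

-- B's bucket dictionary
def pvBuckets (key : String) : PySem.Dict Char (List Int) :=
  (PySem.List.enumerate key.toList).foldl
    (fun d p => d.modify p.2 [] (fun l => l ++ [p.1])) PySem.Dict.empty

lemma pvBuckets_getD (key : String) (c : Char) :
    (pvBuckets key).getD c [] = ((pvPairs key).filter (fun p => p.1 == c)).map (fun p => p.2) := by
  have h : (pvPairs key).foldl (fun d p => d.modify p.1 [] (fun x => x ++ [p.2]))
      (PySem.Dict.empty : PySem.Dict Char (List Int)) = pvBuckets key := by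
    unfold pvPairs pvBuckets
    rw [List.foldl_map]
  rw [← h, PySem.Dict.getD_foldl_modify_append]
  rfl

lemma pvBuckets_keys (key : String) :
    (pvBuckets key).keys = PySem.Set.ofList key.toList := by
  unfold pvBuckets
  rw [PySem.Dict.keys_foldl_modify_key (PySem.List.enumerate key.toList)
       (fun p => p.2) [] (fun _ p => fun l => l ++ [p.1]) PySem.Dict.empty]
  have h : (PySem.Dict.empty : PySem.Dict Char (List Int)).keys = [] := rfl
  rw [h, PySem.Set.update_nil_left, PySem.List.map_snd_enumerate]

lemma pvPairs_snd_lt (key : String) : (pvPairs key).Pairwise (fun p q => p.2 < q.2) := by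
  unfold pvPairs
  exact (PySem.List.pairwise_lt_enumerate key.toList 0).map _ (fun a b h => h)

lemma pvPairs_nodup (key : String) : (pvPairs key).Nodup := by
  exact (pvPairs_snd_lt key).imp (fun h heq => absurd (heq ▸ h) (lt_irrefl _))

lemma pvPairs_fst_mem (key : String) (p : Char × Int) (hp : p ∈ pvPairs key) :
    p.1 ∈ key.toList := by
  unfold pvPairs at hp
  rcases List.mem_map.1 hp with ⟨q, hq, rfl⟩
  rcases (PySem.List.mem_enumerate_iff _ _ _).1 hq with ⟨k, hk, rfl⟩
  exact List.getElem_mem hk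

lemma pvMain (key : String) : get_key_order key = get_key_order_alt key := by
  unfold get_key_order get_key_order_alt
  by_cases hd : PySem.Str.strIsdigit key
  · rw [if_pos hd, if_pos hd]
  · rw [if_neg hd, if_neg hd]
    show (PySem.List.sorted2
        ((PySem.List.enumerate key.toList).foldl (fun acc p => acc ++ [(p.2, p.1)]) [])
        (fun p => p.1) (fun p => p.2)).map (fun p => p.2) =
      (PySem.List.sorted (pvBuckets key).keys (fun c => c)).foldl
        (fun acc c => acc ++ (pvBuckets key).getD c []) []
    rw [PySem.List.foldl_append_singleton_eq_map (fun p : Int × Char => (p.2, p.1))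
          (PySem.List.enumerate key.toList) []]
    rw [List.nil_append, ← pvPairs]
    rw [PySem.List.foldl_append_eq_flatMap, List.nil_append]
    -- name the sorted distinct characters
    rw [pvBuckets_keys]
    have hksnd : (PySem.List.sorted (PySem.Set.ofList key.toList) (fun c => c)).Nodup := by
      have hp := PySem.List.sorted_perm (PySem.Set.ofList key.toList) (fun c : Char => c) false
      exact hp.symm.nodup (PySem.Set.nodup_ofList _)
    have hkslt := PySem.List.sorted_ofList_pairwise_lt (key.toList)
    have hC : PySem.List.sorted2 (pvPairs key) (fun p => p.1) (fun p => p.2) =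
        (PySem.List.sorted (PySem.Set.ofList key.toList) (fun c => c)).flatMap
          (fun c => (pvPairs key).filter (fun p => p.1 == c)) := by
      apply pvSorted2_eq_of_perm_of_pairwise _ _ (pvPairs_nodup key)
      · apply pvGroup_perm _ _ hksnd
        intro p hp
        rw [PySem.List.mem_sorted, PySem.Set.mem_ofList]
        exact pvPairs_fst_mem key p hp
      · exact pvGroup_pairwise (pvPairs key) (pvPairs_snd_lt key) _ hkslt
    rw [hC, List.map_flatMap]
    apply List.flatMap_congr
    intro c _
    rw [pvBuckets_getD]

-- ===== VERDICT (by name: the statement is the Claim_ definition above) =====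
theorem get_key_order_spec : Claim_equal_get_key_order := by
  intro key _
  unfold Spec_get_key_order
  exact pvMain key
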